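-- pv_equiv track=rewrite | github.com/Sy-Zhang/MMC-PCFG | lib/model/vpcfg/utils.py | get_left_branching_tree
-- ===== SOURCE A (Python) =====
-- def get_left_branching_tree(length, SHIFT=0, REDUCE=1):
--     tree = [SHIFT, SHIFT]
--     stack = ['', '']
--     num_shift = 2
--     while len(tree) < 2 * length - 1:
--         if len(stack) < 2:
--             tree.append(SHIFT)
--             stack.append('')
--             num_shift += 1
--         elif num_shift >= length:
--             tree.append(REDUCE)
--             stack.pop()
--         else:
--             tree.append(REDUCE)
--             stack.pop()
--     return tree
-- ===== SOURCE B (Python) =====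
-- def get_left_branching_tree(length, SHIFT=0, REDUCE=1):
--     n = max(0, 2 * length - 3)
--     return [SHIFT, SHIFT] + [REDUCE if i % 2 == 0 else SHIFT for i in range(n)]
-- ===== Notes on version B (the rewrite author's own statement) =====
-- stated objective: simpler
-- what changed: Replaces the shift/reduce stack-machine simulation (list, stack, num_shift counter) with a direct closed-form construction: [SHIFT, SHIFT] followed by max(0, 2*length-3) entries alternating REDUCE, SHIFT.
import Mathlib
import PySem

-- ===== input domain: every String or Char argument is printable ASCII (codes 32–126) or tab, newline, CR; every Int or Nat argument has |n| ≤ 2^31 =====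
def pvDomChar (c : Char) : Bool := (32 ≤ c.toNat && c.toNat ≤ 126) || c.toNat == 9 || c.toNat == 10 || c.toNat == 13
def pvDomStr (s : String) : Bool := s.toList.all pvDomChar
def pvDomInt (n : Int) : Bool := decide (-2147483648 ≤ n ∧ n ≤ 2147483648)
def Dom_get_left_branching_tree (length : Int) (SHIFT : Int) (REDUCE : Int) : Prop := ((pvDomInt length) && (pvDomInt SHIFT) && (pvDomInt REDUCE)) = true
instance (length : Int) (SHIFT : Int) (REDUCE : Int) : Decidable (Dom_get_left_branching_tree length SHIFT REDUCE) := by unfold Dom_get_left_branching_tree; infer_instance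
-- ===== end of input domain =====

-- B replaces A's shift/reduce stack-machine simulation by a direct closed-form
-- construction of the same tree sequence (objective: simpler).

-- ===== PORT A =====
-- the while loop of A: state = (tree, stack, num_shift)
def pvLoopA (length SHIFT REDUCE : Int) (tree : List Int) (stack : List String) (num_shift : Int) : List Int :=
  if h : (tree.length : Int) < 2 * length - 1 then
    if stack.length < 2 then
      pvLoopA length SHIFT REDUCE (tree ++ [SHIFT]) (stack ++ [""]) (num_shift + 1)
    else if num_shift ≥ length then
      pvLoopA length SHIFT REDUCE (tree ++ [REDUCE]) stack.dropLast num_shift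
    else
      pvLoopA length SHIFT REDUCE (tree ++ [REDUCE]) stack.dropLast num_shift
  else tree
termination_by (2 * length - 1 - tree.length).toNat
decreasing_by all_goals simp [List.length_append]; omega

def get_left_branching_tree (length : Int) (SHIFT : Int) (REDUCE : Int) : List Int :=
  pvLoopA length SHIFT REDUCE [SHIFT, SHIFT] ["", ""] 2

-- ===== PORT B =====
def get_left_branching_tree_alt (length : Int) (SHIFT : Int) (REDUCE : Int) : List Int :=
  let n := max 0 (2 * length - 3)
  [SHIFT, SHIFT] ++ (PySem.List.pyRange 0 n 1).map (fun i => if i % 2 == 0 then REDUCE else SHIFT)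

-- ===== PRECONDITION & SPEC =====
def Spec_get_left_branching_tree (length : Int) (SHIFT : Int) (REDUCE : Int) (out : List Int) : Prop := out = get_left_branching_tree_alt length SHIFT REDUCE
instance (length : Int) (SHIFT : Int) (REDUCE : Int) (out : List Int) : Decidable (Spec_get_left_branching_tree length SHIFT REDUCE out) := by unfold Spec_get_left_branching_tree; infer_instance

-- ===== CLAIM (what is proved, stated in full; the proofs are below) =====
def Claim_equal_get_left_branching_tree : Prop := ∀ (length : Int) (SHIFT : Int) (REDUCE : Int), Dom_get_left_branching_tree length SHIFT REDUCE → Spec_get_left_branching_tree length SHIFT REDUCE (get_left_branching_tree length SHIFT REDUCE)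

-- ===== LEMMAS AND PROOFS =====

-- the alternating tail: b = true means "stack currently holds 2 items" (next token REDUCE)
def pvAlt (SHIFT REDUCE : Int) : Nat → Bool → List Int
  | 0, _ => []
  | Nat.succ k, true => REDUCE :: pvAlt SHIFT REDUCE k false
  | Nat.succ k, false => SHIFT :: pvAlt SHIFT REDUCE k true

theorem pvLoopA_eq (length SHIFT REDUCE : Int) :
    ∀ (k : Nat) (tree : List Int) (stack : List String) (num_shift : Int) (b : Bool),
      stack.length = (if b then 2 else 1) →
      (2 * length - 1 - tree.length).toNat = k →
      pvLoopA length SHIFT REDUCE tree stack num_shift = tree ++ pvAlt SHIFT REDUCE k b := by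
  intro k
  induction k with
  | zero =>
    intro tree stack num_shift b hs hk
    rw [pvLoopA]
    have : ¬ ((tree.length : Int) < 2 * length - 1) := by omega
    simp [this, pvAlt]
  | succ k ih =>
    intro tree stack num_shift b hs hk
    rw [pvLoopA]
    have hlt : (tree.length : Int) < 2 * length - 1 := by omega
    rw [dif_pos hlt]
    cases b with
    | true =>
      have h2 : ¬ (stack.length < 2) := by simp at hs; omega
      rw [if_neg h2]
      have hpop : stack.dropLast.length = 1 := by
        simp [List.length_dropLast]; simp at hs; omega
      have hrec : pvLoopA length SHIFT REDUCE (tree ++ [REDUCE]) stack.dropLast num_shift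
          = (tree ++ [REDUCE]) ++ pvAlt SHIFT REDUCE k false := by
        apply ih _ _ num_shift false (by simpa using hpop)
        simp [List.length_append]; omega
      split_ifs <;> rw [hrec] <;> simp [pvAlt]
    | false =>
      have h2 : stack.length < 2 := by simp at hs; omega
      rw [if_pos h2]
      rw [ih _ _ (num_shift + 1) true (by simp at hs ⊢; omega)
          (by simp [List.length_append]; omega)]
      simp [pvAlt]

theorem pvAlt_eq_map (SHIFT REDUCE : Int) :
    ∀ (n : Nat) (a : Int), 0 ≤ a →
      (PySem.List.pyRange a (a + n) 1).map (fun i => if i % 2 == 0 then REDUCE else SHIFT)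
        = pvAlt SHIFT REDUCE n (a % 2 == 0) := by
  intro n
  induction n with
  | zero =>
    intro a _
    rw [PySem.List.pyRange_one_eq_nil (by omega)]
    simp [pvAlt]
  | succ n ih =>
    intro a ha
    rw [PySem.List.pyRange_one_cons (by push_cast; omega)]
    have harg : a + ((n : Int) + 1) = (a + 1) + (n : Int) := by ring
    push_cast
    rw [harg]
    rw [List.map_cons, ih (a + 1) (by omega)]
    rcases Int.emod_two_eq a with h | h
    · have h1 : (a + 1) % 2 = 1 := by omega
      simp [h, h1, pvAlt]
    · have h1 : (a + 1) % 2 = 0 := by omega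
      simp [h, h1, pvAlt]

-- ===== VERDICT (by name: the statement is the Claim_ definition above) =====
theorem get_left_branching_tree_spec : Claim_equal_get_left_branching_tree := by
  intro length SHIFT REDUCE _
  unfold Spec_get_left_branching_tree get_left_branching_tree get_left_branching_tree_alt
  rw [pvLoopA_eq length SHIFT REDUCE (2 * length - 3).toNat [SHIFT, SHIFT] ["", ""] 2 true
      (by simp) (by simp; omega)]
  have hmax : max 0 (2 * length - 3) = ((2 * length - 3).toNat : Int) := by omega
  have h0 : ((2 * length - 3).toNat : Int) = 0 + ((2 * length - 3).toNat : Int) := by ring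
  simp only [hmax]
  rw [h0, pvAlt_eq_map SHIFT REDUCE (2 * length - 3).toNat 0 (by omega)]
  norm_num
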